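-- pv_equiv track=rewrite | github.com/CuberHuber/best-vacation | src/the_best_vacation/bv.py | _find_continuous_sequences
-- ===== SOURCE A (Python) =====
-- def _find_continuous_sequences(indices):
--     """Find continuous sequences of indices."""
--     sequences = []
--     current_sequence = []
--
--     for i in range(len(indices)):
--         if i == 0 or indices[i] == indices[i - 1] + 1:
--             current_sequence.append(indices[i])
--         else:
--             if current_sequence:
--                 sequences.append(current_sequence)
--             current_sequence = [indices[i]]
--
--     if current_sequence:
--         sequences.append(current_sequence)
--
--     return sequences
-- ===== SOURCE B (Python) =====
-- def _find_continuous_sequences(indices):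
--     """Find continuous sequences of indices."""
--     n = len(indices)
--     cuts = [i for i in range(1, n) if indices[i] != indices[i - 1] + 1]
--     bounds = [0] + cuts + [n]
--     return [indices[lo:hi] for lo, hi in zip(bounds, bounds[1:])] if n else []
-- ===== Notes on version B (the rewrite author's own statement) =====
-- stated objective: alternative
-- what changed: Replaces A's single streaming pass with flush-on-break accumulator bookkeeping by two staged passes: first compute the list of break positions (indices where consecutiveness fails), then cut the input into slices between consecutive break positions.
import Mathlib
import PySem

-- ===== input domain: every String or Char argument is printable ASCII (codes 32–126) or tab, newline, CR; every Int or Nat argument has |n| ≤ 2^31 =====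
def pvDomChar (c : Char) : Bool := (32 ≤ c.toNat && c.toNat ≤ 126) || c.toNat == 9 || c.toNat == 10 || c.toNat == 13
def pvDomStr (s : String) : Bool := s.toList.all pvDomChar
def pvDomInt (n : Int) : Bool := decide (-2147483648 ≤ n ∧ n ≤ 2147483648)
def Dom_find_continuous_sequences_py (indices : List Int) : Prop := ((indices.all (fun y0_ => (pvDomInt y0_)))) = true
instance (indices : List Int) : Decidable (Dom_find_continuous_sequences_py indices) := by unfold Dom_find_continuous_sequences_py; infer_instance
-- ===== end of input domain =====

-- B replaces A's streaming flush-loop by two staged passes (collect break positions, then slice between them); same result, alternative decomposition.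

-- ===== PORT A =====
def find_continuous_sequences_py (indices : List Int) : List (List Int) :=
  let st := (PySem.List.pyRange 0 (PySem.List.len indices) 1).foldl
    (fun (st : List (List Int) × List Int) i =>
      if i = 0 ∨ PySem.List.pyGetD indices i 0 = PySem.List.pyGetD indices (i - 1) 0 + 1 then
        (st.1, st.2 ++ [PySem.List.pyGetD indices i 0])
      else
        (if st.2 ≠ [] then st.1 ++ [st.2] else st.1, [PySem.List.pyGetD indices i 0]))
    ([], [])
  if st.2 ≠ [] then st.1 ++ [st.2] else st.1

-- ===== PORT B =====
def find_continuous_sequences_py_alt (indices : List Int) : List (List Int) :=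
  let n : Int := PySem.List.len indices
  let cuts : List Int := (PySem.List.pyRange 1 n 1).filter
      (fun i => !(PySem.List.pyGetD indices i 0 == PySem.List.pyGetD indices (i - 1) 0 + 1))
  let bounds : List Int := 0 :: cuts ++ [n]
  if n ≠ 0 then
    (bounds.zip (bounds.drop 1)).map (fun p => PySem.List.slice indices (some p.1) (some p.2))
  else []

-- ===== PRECONDITION & SPEC =====
def Spec_find_continuous_sequences_py (indices : List Int) (out : List (List Int)) : Prop := out = find_continuous_sequences_py_alt indices
instance (indices : List Int) (out : List (List Int)) : Decidable (Spec_find_continuous_sequences_py indices out) := by unfold Spec_find_continuous_sequences_py; infer_instance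

-- ===== CLAIM (what is proved, stated in full; the proofs are below) =====
def Claim_equal_find_continuous_sequences_py : Prop := ∀ (indices : List Int), Dom_find_continuous_sequences_py indices → Spec_find_continuous_sequences_py indices (find_continuous_sequences_py indices)

-- ===== LEMMAS AND PROOFS =====

-- value-level model of A's loop: prev = previous value, cur = current run, acc = emitted runs
def pvGLoop (prev : Int) (cur : List Int) (acc : List (List Int)) : List Int → List (List Int) × List Int
  | [] => (acc, cur)
  | x :: xs => if x = prev + 1 then pvGLoop x (cur ++ [x]) acc xs else pvGLoop x [x] (acc ++ [cur]) xs

-- value-level grouping: (continuation of the run after x, later groups)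
def pvVGroup (x : Int) : List Int → List Int × List (List Int)
  | [] => ([], [])
  | y :: ys =>
    let r := pvVGroup y ys
    if y = x + 1 then (y :: r.1, r.2) else ([], (y :: r.1) :: r.2)

-- value-level model of B's first pass: break positions, p = position of the next element
def pvCuts (p : Int) (prev : Int) : List Int → List Int
  | [] => []
  | y :: ys => if y = prev + 1 then pvCuts (p + 1) y ys else p :: pvCuts (p + 1) y ys

-- B's second pass on a bounds list
def pvPairsMap (indices : List Int) (bs : List Int) : List (List Int) :=
  (bs.zip (bs.drop 1)).map (fun p => PySem.List.slice indices (some p.1) (some p.2))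

-- bridge: A's accumulator loop, finalised, equals the value-level grouping
theorem pvGLoop_eq_vGroup (xs : List Int) : ∀ (x : Int) (cur : List Int) (acc : List (List Int)),
    (pvGLoop x cur acc xs).1 ++ [(pvGLoop x cur acc xs).2]
      = acc ++ ((cur ++ (pvVGroup x xs).1) :: (pvVGroup x xs).2) := by
  induction xs with
  | nil => intro x cur acc; simp [pvGLoop, pvVGroup]
  | cons y ys ih =>
    intro x cur acc
    by_cases h : y = x + 1 <;> simp [pvGLoop, pvVGroup, h, ih]

-- A's indexed foldl over the range equals the value-level loop
theorem pvFoldl_eq_gLoop (indices : List Int) (xs : List Int) : ∀ (n : Nat) (prev : Int) (cur : List Int) (acc : List (List Int)),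
    indices.drop n = xs → 0 < n → indices[n - 1]? = some prev → cur ≠ [] →
    ((PySem.List.pyRange (n : Int) (PySem.List.len indices) 1).foldl
      (fun (st : List (List Int) × List Int) i =>
        if i = 0 ∨ PySem.List.pyGetD indices i 0 = PySem.List.pyGetD indices (i - 1) 0 + 1 then
          (st.1, st.2 ++ [PySem.List.pyGetD indices i 0])
        else
          (if st.2 ≠ [] then st.1 ++ [st.2] else st.1, [PySem.List.pyGetD indices i 0]))
      (acc, cur))
    = pvGLoop prev cur acc xs := by
  induction xs with
  | nil =>
    intro n prev cur acc hdrop hn _ _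
    have hlen : indices.length ≤ n := by
      by_contra h
      have := List.drop_eq_nil_iff.mp hdrop
      omega
    rw [show (PySem.List.len indices) = (indices.length : Int) from rfl,
        PySem.List.pyRange_one_eq_nil (by exact_mod_cast hlen)]
    simp [pvGLoop]
  | cons x xs ih =>
    intro n prev cur acc hdrop hn hprev hcur
    have hlt : n < indices.length := by
      by_contra h
      rw [List.drop_eq_nil_iff.mpr (by omega)] at hdrop
      simp at hdrop
    have hx : indices[n]? = some x := by
      have := congrArg (·.head?) hdrop
      simpa [List.head?_drop] using this
    have hgx : PySem.List.pyGetD indices (n : Int) 0 = x := by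
      rw [PySem.List.pyGetD_eq_getElem indices 0 (by positivity) (by exact_mod_cast hlt)]
      simp only [Int.toNat_natCast]
      exact Option.some.inj (by rw [← List.getElem?_eq_getElem]; exact hx)
    have hgp : PySem.List.pyGetD indices ((n : Int) - 1) 0 = prev := by
      have h1 : ((n : Int) - 1) = ((n - 1 : Nat) : Int) := by omega
      rw [h1, PySem.List.pyGetD_eq_getElem indices 0 (by positivity) (by exact_mod_cast (by omega : n - 1 < indices.length))]
      simp only [Int.toNat_natCast]
      exact Option.some.inj (by rw [← List.getElem?_eq_getElem]; exact hprev)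
    rw [show (PySem.List.len indices) = (indices.length : Int) from rfl,
        PySem.List.pyRange_one_cons (by exact_mod_cast hlt)]
    have hdrop' : indices.drop (n + 1) = xs := by
      have := congrArg (·.tail) hdrop
      simpa [List.tail_drop] using this
    have hx' : indices[(n + 1) - 1]? = some x := by simpa using hx
    have hcast : (n : Int) + 1 = ((n + 1 : Nat) : Int) := by push_cast; ring
    simp only [List.foldl_cons, hgx, hgp, pvGLoop]
    by_cases hc : x = prev + 1
    · rw [if_pos (Or.inr hc), if_pos hc, hcast]
      exact ih (n + 1) x (cur ++ [x]) acc hdrop' (by omega) hx' (by simp)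
    · rw [if_neg (by push Not; exact ⟨by omega, fun h => hc h⟩), if_neg hc, if_pos hcur, hcast]
      exact ih (n + 1) x [x] (acc ++ [cur]) hdrop' (by omega) hx' (by simp)

-- A's current run never becomes empty once it is nonempty
theorem pvGLoop_snd_ne_nil (xs : List Int) : ∀ (x : Int) (cur : List Int) (acc : List (List Int)),
    cur ≠ [] → (pvGLoop x cur acc xs).2 ≠ [] := by
  induction xs with
  | nil => intro x cur acc h; simpa [pvGLoop] using h
  | cons y ys ih =>
    intro x cur acc h
    by_cases hc : y = x + 1 <;> simp [pvGLoop, hc] <;> exact ih _ _ _ (by simp)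

-- B's filter over the index range computes the value-level break positions
theorem pvFilter_eq_cuts (indices : List Int) (xs : List Int) : ∀ (n : Nat) (prev : Int),
    indices.drop n = xs → 0 < n → indices[n - 1]? = some prev →
    (PySem.List.pyRange (n : Int) (PySem.List.len indices) 1).filter
      (fun i => !(PySem.List.pyGetD indices i 0 == PySem.List.pyGetD indices (i - 1) 0 + 1))
    = pvCuts (n : Int) prev xs := by
  induction xs with
  | nil =>
    intro n prev hdrop hn _
    have hlen : indices.length ≤ n := by
      by_contra h
      have := List.drop_eq_nil_iff.mp hdrop
      omega
    rw [show (PySem.List.len indices) = (indices.length : Int) from rfl,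
        PySem.List.pyRange_one_eq_nil (by exact_mod_cast hlen)]
    simp [pvCuts]
  | cons x xs ih =>
    intro n prev hdrop hn hprev
    have hlt : n < indices.length := by
      by_contra h
      rw [List.drop_eq_nil_iff.mpr (by omega)] at hdrop
      simp at hdrop
    have hx : indices[n]? = some x := by
      have := congrArg (·.head?) hdrop
      simpa [List.head?_drop] using this
    have hgx : PySem.List.pyGetD indices (n : Int) 0 = x := by
      rw [PySem.List.pyGetD_eq_getElem indices 0 (by positivity) (by exact_mod_cast hlt)]
      simp only [Int.toNat_natCast]
      exact Option.some.inj (by rw [← List.getElem?_eq_getElem]; exact hx)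
    have hgp : PySem.List.pyGetD indices ((n : Int) - 1) 0 = prev := by
      have h1 : ((n : Int) - 1) = ((n - 1 : Nat) : Int) := by omega
      rw [h1, PySem.List.pyGetD_eq_getElem indices 0 (by positivity) (by exact_mod_cast (by omega : n - 1 < indices.length))]
      simp only [Int.toNat_natCast]
      exact Option.some.inj (by rw [← List.getElem?_eq_getElem]; exact hprev)
    rw [show (PySem.List.len indices) = (indices.length : Int) from rfl,
        PySem.List.pyRange_one_cons (by exact_mod_cast hlt)]
    have hdrop' : indices.drop (n + 1) = xs := by
      have := congrArg (·.tail) hdrop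
      simpa [List.tail_drop] using this
    have hx' : indices[(n + 1) - 1]? = some x := by simpa using hx
    have hcast : (n : Int) + 1 = ((n + 1 : Nat) : Int) := by push_cast; ring
    have ihn := ih (n + 1) x hdrop' (by omega) hx'
    simp only [List.filter_cons, hgx, hgp]
    by_cases hc : x = prev + 1
    · rw [if_neg (by simp [hc]),
          show pvCuts (n : Int) prev (x :: xs) = pvCuts ((n : Int) + 1) x xs by simp [pvCuts, hc],
          hcast]
      exact ihn
    · rw [if_pos (by simp [hc]),
          show pvCuts (n : Int) prev (x :: xs) = (n : Int) :: pvCuts ((n : Int) + 1) x xs by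
            simp [pvCuts, hc],
          hcast]
      exact congrArg (List.cons _) ihn

-- one more element extends a slice by that element
theorem pvSlice_succ (indices : List Int) (lo n : Nat) (x : Int) (hlo : lo ≤ n)
    (hx : indices[n]? = some x) :
    PySem.List.slice indices (some (lo : Int)) (some ((n : Int) + 1))
      = PySem.List.slice indices (some (lo : Int)) (some (n : Int)) ++ [x] := by
  have h1 : ((n : Int) + 1) = ((n + 1 : Nat) : Int) := by push_cast; ring
  rw [h1, PySem.List.slice_natCast, PySem.List.slice_natCast]
  have h2 : n + 1 - lo = (n - lo) + 1 := by omega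
  rw [h2, List.take_add_one]
  congr 1
  have : (indices.drop lo)[n - lo]? = indices[n]? := by
    rw [List.getElem?_drop]; congr 1; omega
  rw [this, hx]; rfl

-- B's staged slicing over the break positions equals the value-level grouping
theorem pvPairsMap_eq_vGroup (indices : List Int) (xs : List Int) : ∀ (n : Nat) (prev : Int) (lo : Nat),
    indices.drop n = xs → 0 < n → indices[n - 1]? = some prev → lo ≤ n →
    pvPairsMap indices ((lo : Int) :: pvCuts (n : Int) prev xs ++ [(indices.length : Int)])
      = (PySem.List.slice indices (some (lo : Int)) (some (n : Int)) ++ (pvVGroup prev xs).1)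
        :: (pvVGroup prev xs).2 := by
  induction xs with
  | nil =>
    intro n prev lo hdrop hn hprev hlo
    have hlen : indices.length ≤ n := by
      by_contra h
      have := List.drop_eq_nil_iff.mp hdrop
      omega
    have hn' : n = indices.length := by
      have : n - 1 < indices.length := by
        by_contra h
        simp [List.getElem?_eq_none (by omega : indices.length ≤ n - 1)] at hprev
      omega
    subst hn'
    simp [pvCuts, pvVGroup, pvPairsMap]
  | cons x xs ih =>
    intro n prev lo hdrop hn hprev hlo
    have hlt : n < indices.length := by
      by_contra h
      rw [List.drop_eq_nil_iff.mpr (by omega)] at hdrop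
      simp at hdrop
    have hx : indices[n]? = some x := by
      have := congrArg (·.head?) hdrop
      simpa [List.head?_drop] using this
    have hdrop' : indices.drop (n + 1) = xs := by
      have := congrArg (·.tail) hdrop
      simpa [List.tail_drop] using this
    have hx' : indices[(n + 1) - 1]? = some x := by simpa using hx
    have hcast : (n : Int) + 1 = ((n + 1 : Nat) : Int) := by push_cast; ring
    by_cases hc : x = prev + 1
    · have ihn := ih (n + 1) x lo hdrop' (by omega) hx' (by omega)
      simp only [pvCuts, pvVGroup, if_pos hc]
      rw [← hcast] at ihn
      rw [ihn, pvSlice_succ indices lo n x hlo hx]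
      simp
    · have ihn := ih (n + 1) x n hdrop' (by omega) hx' (by omega)
      simp only [pvCuts, pvVGroup, if_neg hc]
      have hstep : pvPairsMap indices ((lo : Int) :: (n : Int) :: pvCuts ((n : Int) + 1) x xs ++ [(indices.length : Int)])
          = PySem.List.slice indices (some (lo : Int)) (some (n : Int))
            :: pvPairsMap indices ((n : Int) :: pvCuts ((n : Int) + 1) x xs ++ [(indices.length : Int)]) := by
        simp [pvPairsMap]
      rw [hstep]
      rw [← hcast] at ihn
      rw [ihn, pvSlice_succ indices n n x le_rfl hx]
      have hself : PySem.List.slice indices (some (n : Int)) (some (n : Int)) = [] := by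
        rw [PySem.List.slice_natCast]; simp
      rw [hself]
      simp

-- ===== VERDICT (by name: the statement is the Claim_ definition above) =====
theorem find_continuous_sequences_py_spec : Claim_equal_find_continuous_sequences_py := by
  intro indices _
  unfold Spec_find_continuous_sequences_py
  cases indices with
  | nil => rfl
  | cons p rest =>
    have hloop := pvFoldl_eq_gLoop (p :: rest) rest 1 p [p] [] (by simp) (by omega)
      (by simp) (by simp)
    have hfin := pvGLoop_eq_vGroup rest p [p] []
    have hne := pvGLoop_snd_ne_nil rest p [p] [] (by simp)
    have hcuts := pvFilter_eq_cuts (p :: rest) rest 1 p (by simp) (by omega) (by simp)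
    have hslices := pvPairsMap_eq_vGroup (p :: rest) rest 1 p 0 (by simp) (by omega) (by simp) (by omega)
    -- A side
    unfold find_continuous_sequences_py find_continuous_sequences_py_alt
    rw [show (PySem.List.len (p :: rest)) = ((rest.length + 1 : Nat) : Int) by
          simp [PySem.List.len]]
    rw [PySem.List.pyRange_one_cons (by positivity)]
    have h0 : PySem.List.pyGetD (p :: rest) 0 0 = p := by
      rw [PySem.List.pyGetD_of_nonneg _ _ le_rfl]; rfl
    simp only [List.foldl_cons, true_or, if_true, zero_add, h0, List.nil_append]
    rw [show (PySem.List.len (p :: rest)) = ((rest.length + 1 : Nat) : Int) by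
          simp [PySem.List.len]] at hloop hcuts
    simp only [Nat.cast_one] at hloop hcuts
    rw [hloop, if_pos hne, hfin]
    -- B side
    rw [if_pos (show ((rest.length + 1 : Nat) : Int) ≠ 0 by omega), hcuts]
    simp only [Nat.cast_zero, Nat.cast_one, List.length_cons] at hslices
    show [] ++ (([p] ++ (pvVGroup p rest).1) :: (pvVGroup p rest).2)
        = pvPairsMap (p :: rest) ((0 : Int) :: pvCuts 1 p rest ++ [((rest.length + 1 : Nat) : Int)])
    rw [hslices]
    have h01 : PySem.List.slice (p :: rest) (some (0 : Int)) (some (1 : Int)) = [p] := by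
      rw [show (0 : Int) = ((0 : Nat) : Int) from rfl, show (1 : Int) = ((1 : Nat) : Int) from rfl,
          PySem.List.slice_natCast]
      rfl
    rw [h01]
    simp
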